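-- pv_equiv track=rewrite | github.com/alistar1381/myproject | Searching algorithms/exponential.py | expobin
-- ===== SOURCE A (Python) =====
-- def expobin(li, item):
--     if li[0] == item:
--         return "The item is in element:%i in the list"%(1)
--     i = 1
--     while i < len(li) and li[i] <= item:
--         i *= 2
--     start = i // 2
--     end = min(i, len(li) - 1)
--     mid = (end + start) // 2
--     while start <= end:
--         if li[mid] == item:
--             return "This item is in element:{} of the list".format(mid + 1)
--         elif li[mid] < item:
--             start = mid + 1
--         elif li[mid] > item:
--             end = mid - 1
--         mid = (start + end) // 2
--     else:
--         return "Not found"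
-- ===== SOURCE B (Python) =====
-- def _bsearch(li, item, lo, hi):
--     # recursive binary search returning the probed index (or None), not a message
--     if lo > hi:
--         return None
--     mid = (lo + hi) // 2
--     v = li[mid]
--     if v == item:
--         return mid
--     if v < item:
--         return _bsearch(li, item, mid + 1, hi)
--     return _bsearch(li, item, lo, mid - 1)
--
--
-- def expobin(li, item):
--     if li[0] == item:
--         return "The item is in element:%i in the list" % (1)
--     n = len(li)
--     # exponential phase tracked by the exponent k (bound i = 2**k), not by i itself
--     k = 0
--     while (1 << k) < n and li[1 << k] <= item:
--         k += 1
--     i = 1 << k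
--     idx = _bsearch(li, item, i // 2, min(i, n - 1))
--     if idx is None:
--         return "Not found"
--     return "This item is in element:{} of the list".format(idx + 1)
-- ===== Notes on version B (the rewrite author's own statement) =====
-- stated objective: alternative
-- what changed: The doubling loop now tracks the exponent k (probing li[1<<k]) instead of mutating i, and the binary search becomes a recursive helper over (lo,hi) that returns an optional index, with the result message formatted once at the caller instead of inside the loop.
import Mathlib
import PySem

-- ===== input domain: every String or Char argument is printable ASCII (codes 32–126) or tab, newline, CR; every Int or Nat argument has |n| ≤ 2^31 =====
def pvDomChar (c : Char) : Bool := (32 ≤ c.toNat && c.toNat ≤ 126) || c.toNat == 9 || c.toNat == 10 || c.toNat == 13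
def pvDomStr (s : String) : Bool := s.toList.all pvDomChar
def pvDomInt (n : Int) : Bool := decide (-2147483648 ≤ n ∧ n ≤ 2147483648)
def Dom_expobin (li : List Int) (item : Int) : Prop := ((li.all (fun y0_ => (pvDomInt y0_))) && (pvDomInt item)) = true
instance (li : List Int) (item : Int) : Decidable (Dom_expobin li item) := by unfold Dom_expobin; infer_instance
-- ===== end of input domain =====

-- B tracks the exponent k (probing li[2^k]) instead of mutating i, and its binary search is a
-- recursive helper returning an optional index, the message being formatted once at the caller
-- (objective: alternative; same probes, same cost).

-- ===== PORT A =====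
-- A's doubling loop `while i < len(li) and li[i] <= item: i *= 2`, transliterated as a fueled
-- loop over the mutable state i.  Fuel li.length + 1 is a pure totality guard: i doubles from 1,
-- so the loop runs at most log2(len)+1 ≤ len iterations and the fuel is never exhausted.
-- li[i] is only read under the guard i < len (i ≥ 0), so `.getD 0` is unreachable padding.
def expLoopA (li : List Int) (item : Int) : Nat → Nat → Nat
  | 0, i => i
  | fuel+1, i =>
    if i < li.length ∧ (PySem.List.pyGet? li (i : Int)).getD 0 ≤ item
    then expLoopA li item fuel (2 * i)
    else i

-- A's binary-search while-loop, transliterated as a fueled loop over the mutable state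
-- (start, end, mid); mid is threaded through exactly as A updates it (recomputed from the new
-- start/end at the end of each iteration).  The window shrinks each iteration, so fuel
-- li.length + 1 is never exhausted on a run A performs; li[mid] is then always in range.
def binLoopA (li : List Int) (item : Int) : Nat → Int → Int → Int → String
  | 0, _, _, _ => "Not found"
  | fuel+1, s, e, mid =>
    if s ≤ e then
      let v := (PySem.List.pyGet? li mid).getD 0
      if v = item then "This item is in element:" ++ PySem.Int.toStr (mid + 1) ++ " of the list"
      else if v < item then binLoopA li item fuel (mid + 1) e (PySem.Int.floordiv ((mid + 1) + e) 2)
      else binLoopA li item fuel s (mid - 1) (PySem.Int.floordiv (s + (mid - 1)) 2)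
    else "Not found"

def expobin (li : List Int) (item : Int) : String :=
  if (PySem.List.pyGet? li 0).getD 0 = item then "The item is in element:1 in the list"
  else
    let i := expLoopA li item (li.length + 1) 1
    let start : Int := PySem.Int.floordiv (i : Int) 2
    let e : Int := min (i : Int) ((li.length : Int) - 1)
    binLoopA li item (li.length + 1) start e (PySem.Int.floordiv (e + start) 2)

-- ===== PORT B =====
-- B's recursive binary search `_bsearch` over (lo, hi): returns the probed index (or none),
-- no strings inside the search.  Same fueled totality guard as A's loops.
def bsearchB (li : List Int) (item : Int) : Nat → Int → Int → Option Int
  | 0, _, _ => none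
  | fuel+1, lo, hi =>
    if hi < lo then none
    else
      let mid := PySem.Int.floordiv (lo + hi) 2
      let v := (PySem.List.pyGet? li mid).getD 0
      if v = item then some mid
      else if v < item then bsearchB li item fuel (mid + 1) hi
      else bsearchB li item fuel lo (mid - 1)

-- B's exponential phase: the while-loop over the exponent k, probing li[2^k].
def expLoopB (li : List Int) (item : Int) : Nat → Nat → Nat
  | 0, k => k
  | fuel+1, k =>
    if 2 ^ k < li.length ∧ (PySem.List.pyGet? li ((2 ^ k : Nat) : Int)).getD 0 ≤ item
    then expLoopB li item fuel (k + 1)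
    else k

def expobin_alt (li : List Int) (item : Int) : String :=
  if (PySem.List.pyGet? li 0).getD 0 = item then "The item is in element:1 in the list"
  else
    let n := li.length
    let k := expLoopB li item (n + 1) 0
    let i : Nat := 2 ^ k
    match bsearchB li item (n + 1) (PySem.Int.floordiv (i : Int) 2) (min (i : Int) ((n : Int) - 1)) with
    | none => "Not found"
    | some idx => "This item is in element:" ++ PySem.Int.toStr (idx + 1) ++ " of the list"

-- ===== PRECONDITION & SPEC =====
-- Pre_ excludes exactly the empty list, on which A's `li[0]` raises IndexError.
def Pre_expobin (li : List Int) (item : Int) : Prop := li ≠ []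
instance (li : List Int) (item : Int) : Decidable (Pre_expobin li item) := by unfold Pre_expobin; infer_instance
def pvWitness_expobin : List Int × Int := ([1, 3, 5, 7], 5)

def Spec_expobin (li : List Int) (item : Int) (out : String) : Prop := out = expobin_alt li item
instance (li : List Int) (item : Int) (out : String) : Decidable (Spec_expobin li item out) := by unfold Spec_expobin; infer_instance

-- ===== CLAIM (what is proved, stated in full; the proofs are below) =====
def Claim_equal_expobin : Prop := ∀ (li : List Int) (item : Int), Dom_expobin li item → Pre_expobin li item → Spec_expobin li item (expobin li item)

-- ===== LEMMAS AND PROOFS =====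

-- A's doubling loop on i = 2^k is B's exponent loop: expLoopA started at 2^k returns 2^(expLoopB started at k).
theorem expLoopA_eq_pow_expLoopB (li : List Int) (item : Int) :
    ∀ (fuel k : Nat), expLoopA li item fuel (2 ^ k) = 2 ^ (expLoopB li item fuel k) := by
  intro fuel
  induction fuel with
  | zero => intro k; rfl
  | succ n ih =>
    intro k
    simp only [expLoopA, expLoopB]
    split
    · rw [show 2 * 2 ^ k = 2 ^ (k + 1) by ring]; exact ih (k + 1)
    · rfl

-- A's binary loop with the invariant mid = (s + e) // 2 renders B's optional index.
theorem binLoopA_eq_bsearchB (li : List Int) (item : Int) :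
    ∀ (fuel : Nat) (s e : Int),
      binLoopA li item fuel s e (PySem.Int.floordiv (s + e) 2) =
        (match bsearchB li item fuel s e with
         | none => "Not found"
         | some idx => "This item is in element:" ++ PySem.Int.toStr (idx + 1) ++ " of the list") := by
  intro fuel
  induction fuel with
  | zero => intro s e; rfl
  | succ n ih =>
    intro s e
    simp only [binLoopA, bsearchB]
    by_cases h : s ≤ e
    · have h' : ¬ e < s := by omega
      simp only [if_pos h, if_neg h']
      split
      · rfl
      · split
        · exact ih _ _
        · exact ih _ _
    · have h' : e < s := by omega
      simp only [if_neg h, if_pos h']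

-- ===== VERDICT (by name: the statement is the Claim_ definition above) =====
theorem expobin_spec : Claim_equal_expobin := by
  intro li item _ _
  unfold Spec_expobin expobin expobin_alt
  split
  · rfl
  · have hA : expLoopA li item (li.length + 1) 1 = 2 ^ (expLoopB li item (li.length + 1) 0) := by
      simpa using expLoopA_eq_pow_expLoopB li item (li.length + 1) 0
    rw [hA]
    have key : ∀ (s e : Int),
        binLoopA li item (li.length + 1) s e (PySem.Int.floordiv (e + s) 2) =
          (match bsearchB li item (li.length + 1) s e with
           | none => "Not found"
           | some idx => "This item is in element:" ++ PySem.Int.toStr (idx + 1) ++ " of the list") := by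
      intro s e
      rw [Int.add_comm e s]
      exact binLoopA_eq_bsearchB li item _ s e
    exact key _ _
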